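-- pv_equiv track=rewrite | github.com/giovabal/TNExp | webapp/management/commands/export_network.py | normalize_community_map
-- ===== SOURCE A (Python) =====
-- def normalize_community_map(community_map):
--     if not community_map:
--         return {}
--     community_counts = {}
--     for community_id in community_map.values():
--         community_counts[community_id] = community_counts.get(community_id, 0) + 1
--     ordered = sorted(community_counts.items(), key=lambda item: (-item[1], item[0]))
--     remap = {community_id: index for index, (community_id, _) in enumerate(ordered, start=1)}
--     return {node_id: remap[community_id] for node_id, community_id in community_map.items()}
-- ===== SOURCE B (Python) =====
-- def normalize_community_map(community_map):
--     # Rank each community directly by counting how many communities beat it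
--     # (larger frequency, or equal frequency and smaller id) -- no sort, no remap table.
--     vals = list(community_map.values())
--     communities = set(vals)
--     result = {}
--     for node_id, c in community_map.items():
--         n = vals.count(c)
--         rank = 1 + sum(1 for c2 in communities
--                        if vals.count(c2) > n or (vals.count(c2) == n and c2 < c))
--         result[node_id] = rank
--     return result
-- ===== Notes on version B (the rewrite author's own statement) =====
-- stated objective: alternative
-- what changed: B drops the sort-enumerate-remap pipeline entirely: each node's community gets its rank computed directly as 1 + the number of communities that beat it (larger frequency, or equal frequency and smaller id), counting over the distinct community ids; no counter dict, no sort, no remap table.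
import Mathlib
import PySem

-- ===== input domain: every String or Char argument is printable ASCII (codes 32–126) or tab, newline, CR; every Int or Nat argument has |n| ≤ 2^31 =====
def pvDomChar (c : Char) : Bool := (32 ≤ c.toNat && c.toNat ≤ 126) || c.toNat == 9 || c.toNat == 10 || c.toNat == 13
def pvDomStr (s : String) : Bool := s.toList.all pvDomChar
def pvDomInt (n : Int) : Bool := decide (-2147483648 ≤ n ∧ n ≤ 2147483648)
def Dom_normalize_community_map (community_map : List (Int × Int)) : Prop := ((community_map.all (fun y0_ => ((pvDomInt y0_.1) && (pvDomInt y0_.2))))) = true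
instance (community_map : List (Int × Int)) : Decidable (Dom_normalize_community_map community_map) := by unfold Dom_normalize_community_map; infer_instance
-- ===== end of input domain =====

-- B replaces A's sort-enumerate-remap pipeline by computing each community's rank
-- directly as 1 + the number of communities beating it (alternative algorithm, not faster).

-- ===== PORT A =====
def normalize_community_map (community_map : List (Int × Int)) : List (Int × Int) :=
  if community_map = [] then []
  else
    let community_counts := (community_map.map (·.2)).foldl
        (fun d c => d.insert c (d.getD c 0 + 1)) PySem.Dict.empty
    let ordered := PySem.List.sorted2 community_counts.items (fun p => -p.2) (fun p => p.1)
    let remap := (PySem.List.enumerate ordered 1).foldl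
        (fun d q => d.insert q.2.1 q.1) PySem.Dict.empty
    -- remap[community_id]: the key is always present, so the lookup never raises and getD's default is never used
    (community_map.foldl (fun d p => d.insert p.1 (remap.getD p.2 0)) PySem.Dict.empty).items

-- ===== PORT B =====
def normalize_community_map_alt (community_map : List (Int × Int)) : List (Int × Int) :=
  let vals := community_map.map (·.2)
  let communities := PySem.Set.ofList vals
  (community_map.foldl (fun d p =>
    let n := vals.count p.2
    let rank : Int := 1 + (communities.countP
        (fun c2 => decide (vals.count c2 > n) || (decide (vals.count c2 = n) && decide (c2 < p.2))) : Nat)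
    d.insert p.1 rank) PySem.Dict.empty).items

-- ===== PRECONDITION & SPEC =====
def Spec_normalize_community_map (community_map : List (Int × Int)) (out : List (Int × Int)) : Prop := out = normalize_community_map_alt community_map
instance (community_map : List (Int × Int)) (out : List (Int × Int)) : Decidable (Spec_normalize_community_map community_map out) := by unfold Spec_normalize_community_map; infer_instance

-- ===== CLAIM (what is proved, stated in full; the proofs are below) =====
def Claim_equal_normalize_community_map : Prop := ∀ (community_map : List (Int × Int)), Dom_normalize_community_map community_map → Spec_normalize_community_map community_map (normalize_community_map community_map)

-- ===== LEMMAS AND PROOFS =====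

def pvK (p : Int × Int) : Lex (Int × Int) := toLex (-p.2, p.1)

theorem pvK_lt_iff (p q : Int × Int) :
    pvK p < pvK q ↔ q.2 < p.2 ∨ (p.2 = q.2 ∧ p.1 < q.1) := by
  simp only [pvK, Prod.Lex.lt_iff, ofLex_toLex]
  omega

theorem pvK_inj : Function.Injective pvK := by
  intro p q h
  have h' : ((-p.2, p.1) : Int × Int) = (-q.2, q.1) := toLex.injective h
  have h1 : -p.2 = -q.2 := congrArg Prod.fst h'
  have h2 : p.1 = q.1 := congrArg Prod.snd h'
  have : p.2 = q.2 := by omega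
  exact Prod.ext h2 this

theorem pv_sorted2_eq (xs : List (Int × Int)) :
    PySem.List.sorted2 xs (fun p => -p.2) (fun p => p.1) = PySem.List.sorted xs pvK := by
  rw [PySem.List.sorted_eq_foldl_insertBy]
  show List.foldl (fun acc x => PySem.List.insertBy _ x acc) [] xs
     = List.foldl (fun acc x => PySem.List.insertBy _ x acc) [] xs
  congr 1
  funext acc x
  congr 1
  funext a b
  have := pvK_lt_iff a b
  by_cases h1 : (-a.2 : Int) < -b.2 <;> by_cases h2 : (-b.2 : Int) < -a.2 <;>
    by_cases h3 : (a.1 : Int) < b.1 <;>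
    simp [h1, h2, h3, this] <;> omega

theorem pv_countP_lt_of_pairwise (L : List (Int × Int))
    (hp : L.Pairwise (fun a b => pvK a < pvK b)) :
    ∀ (i : Nat) (h : i < L.length), L.countP (fun x => decide (pvK x < pvK L[i])) = i := by
  induction L with
  | nil => intro i h; simp at h
  | cons a t ih =>
    rcases List.pairwise_cons.mp hp with ⟨ha, ht⟩
    intro i h
    cases i with
    | zero =>
      simp only [List.getElem_cons_zero, List.countP_cons]
      have h0 : t.countP (fun x => decide (pvK x < pvK a)) = 0 :=
        List.countP_eq_zero.mpr (fun x hx => by simpa using asymm (ha x hx))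
      simp only [lt_irrefl, decide_false, Bool.false_eq_true, if_false, Nat.add_zero]
      exact h0
    | succ i =>
      have hi : i < t.length := by simpa using h
      have hgl : (a :: t)[i + 1] = t[i] := by simp
      rw [hgl, List.countP_cons]
      have hpa : pvK a < pvK t[i] := ha _ (List.getElem_mem hi)
      simp [ih ht i hi, hpa]

-- remap.getD c 0 computed by A equals 1 + (number of communities strictly before c), B's rank
theorem pv_rank (vals : List Int) (c : Int) (hc : c ∈ vals) :
    (((PySem.List.enumerate (PySem.List.sorted2
        ((vals.foldl (fun d c => d.insert c (d.getD c 0 + 1)) PySem.Dict.empty).items)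
        (fun p => -p.2) (fun p => p.1)) 1).foldl
        (fun d q => d.insert q.2.1 q.1) PySem.Dict.empty).getD c 0)
    = 1 + ((PySem.Set.ofList vals).countP
        (fun c2 => decide (vals.count c2 > vals.count c) || (decide (vals.count c2 = vals.count c) && decide (c2 < c))) : Nat) := by
  rw [PySem.Dict.foldl_insert_getD_add_one_eq_counter, PySem.Dict.items_counter, pv_sorted2_eq]
  set S := PySem.Set.ofList vals with hS
  set L := PySem.List.sorted (S.map (fun k => (k, (vals.count k : Int)))) pvK with hLdef
  have hSnodup : S.Nodup := PySem.Set.nodup_ofList vals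
  have hperm : L.Perm (S.map (fun k => (k, (vals.count k : Int)))) :=
    PySem.List.sorted_perm _ _ false
  have hmapfst : (S.map (fun k => (k, (vals.count k : Int)))).map Prod.fst = S := by
    simp [List.map_map, Function.comp_def]
  have hitemsnodup : (S.map (fun k => (k, (vals.count k : Int)))).Nodup :=
    List.Nodup.of_map Prod.fst (by rw [hmapfst]; exact hSnodup)
  have hLnodup : L.Nodup := (hperm.nodup_iff).mpr hitemsnodup
  have hLfst : (L.map Prod.fst).Nodup := by
    have hp2 : (L.map Prod.fst).Perm S := by rw [← hmapfst]; exact hperm.map Prod.fst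
    exact (hp2.nodup_iff).mpr hSnodup
  have hpairle : L.Pairwise (fun a b => pvK a ≤ pvK b) := PySem.List.sorted_pairwise _ _
  have hpair : L.Pairwise (fun a b => pvK a < pvK b) := by
    refine (hpairle.and hLnodup).imp ?_
    rintro a b ⟨h1, h2⟩
    exact lt_of_le_of_ne h1 (fun he => h2 (pvK_inj he))
  have hmem : (c, (vals.count c : Int)) ∈ L := by
    rw [hperm.mem_iff]
    exact List.mem_map_of_mem ((PySem.Set.mem_ofList vals c).mpr hc)
  obtain ⟨i, hi, hgi⟩ := List.mem_iff_getElem.mp hmem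
  have hmapenum : (PySem.List.enumerate L 1).map (fun q => q.2.1) = L.map Prod.fst := by
    calc (PySem.List.enumerate L 1).map (fun q => q.2.1)
        = ((PySem.List.enumerate L 1).map (fun q => q.2)).map Prod.fst := by
          rw [List.map_map]; rfl
      _ = L.map Prod.fst := by rw [PySem.List.map_snd_enumerate]
  have hfresh : ∀ a ∈ PySem.List.enumerate L 1,
      (PySem.Dict.empty : PySem.Dict Int Int).contains a.2.1 = false :=
    fun a _ => PySem.Dict.contains_empty _
  have hidnodup : ((PySem.List.enumerate L 1).map (fun q => q.2.1)).Nodup := by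
    rw [hmapenum]; exact hLfst
  have hitems := PySem.Dict.items_foldl_insert_fresh (PySem.List.enumerate L 1)
      (fun q => q.2.1) (fun q => q.1) PySem.Dict.empty hfresh hidnodup
  have hkeys : ((PySem.List.enumerate L 1).foldl
      (fun d q => d.insert q.2.1 q.1) PySem.Dict.empty).keys.Nodup := by
    simp only [PySem.Dict.keys, hitems]
    simpa [List.map_map, Function.comp_def] using hidnodup
  have hq : ((1 : Int) + (i : Int), L[i]) ∈ PySem.List.enumerate L 1 :=
    (PySem.List.mem_enumerate_iff L 1 _).mpr ⟨i, hi, rfl⟩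
  have hin : (c, (1 : Int) + (i : Int)) ∈ ((PySem.List.enumerate L 1).foldl
      (fun d q => d.insert q.2.1 q.1) PySem.Dict.empty).items := by
    rw [hitems]
    refine List.mem_append_right _ (List.mem_map.mpr ⟨((1 : Int) + (i : Int), L[i]), hq, ?_⟩)
    rw [hgi]
  rw [PySem.Dict.getD_of_mem_items _ hin hkeys 0]
  have h3 : L.countP (fun x => decide (pvK x < pvK (c, (vals.count c : Int)))) = i := by
    have := pv_countP_lt_of_pairwise L hpair i hi
    rwa [hgi] at this
  have h1 : S.countP (fun c2 => decide (vals.count c2 > vals.count c) ||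
        (decide (vals.count c2 = vals.count c) && decide (c2 < c)))
      = (S.map (fun k => (k, (vals.count k : Int)))).countP
        (fun x => decide (pvK x < pvK (c, (vals.count c : Int)))) := by
    rw [List.countP_map]
    congr 1
    funext c2
    have hiff := pvK_lt_iff (c2, (vals.count c2 : Int)) (c, (vals.count c : Int))
    simp only at hiff
    simp only [Function.comp_apply, ← Bool.decide_and, ← Bool.decide_or, decide_eq_decide]
    rw [hiff]
    omega
  have h2 : (S.map (fun k => (k, (vals.count k : Int)))).countP
      (fun x => decide (pvK x < pvK (c, (vals.count c : Int)))) = i :=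
    ((hperm.countP_eq _).symm).trans h3
  rw [h1, h2]

-- ===== VERDICT (by name: the statement is the Claim_ definition above) =====
theorem normalize_community_map_spec : Claim_equal_normalize_community_map := by
  intro cm _
  unfold Spec_normalize_community_map normalize_community_map normalize_community_map_alt
  by_cases hcm : cm = []
  · subst hcm; rfl
  · simp only [if_neg hcm]
    apply congrArg PySem.Dict.items
    apply PySem.List.foldl_congr_mem
    intro acc p hp
    have hc : p.2 ∈ cm.map (fun x => x.2) := List.mem_map_of_mem hp
    rw [pv_rank (cm.map (fun x => x.2)) p.2 (by simpa using hc)]
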